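-- pv_equiv track=rewrite | github.com/Shubham-badlani/Job | PersonalBudgetTracker/agents/matcher.py | _determine_highest_degree
-- ===== SOURCE A (Python) =====
-- def _determine_highest_degree(degrees):
--     """Determine the highest degree from a list of degrees"""
--     degree_rank = {
--         'doctorate': 5,
--         'master': 4,
--         'bachelor': 3,
--         'associate': 2,
--         'high school': 1
--     }
--
--     highest_rank = 0
--     highest_degree = None
--
--     for degree in degrees:
--         rank = degree_rank.get(degree, 0)
--         if rank > highest_rank:
--             highest_rank = rank
--             highest_degree = degree
--
--     return highest_degree
-- ===== SOURCE B (Python) =====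
-- def _determine_highest_degree(degrees):
--     """Determine the highest degree from a list of degrees"""
--     degree_set = set(degrees)
--     for name in ('doctorate', 'master', 'bachelor', 'associate', 'high school'):
--         if name in degree_set:
--             return name
--     return None
-- ===== Notes on version B (the rewrite author's own statement) =====
-- stated objective: idiomatic
-- what changed: Instead of scanning the list while tracking a running maximum rank, B builds a set of the inputs once and walks the fixed ranking names in descending order, returning the first one present.
import Mathlib
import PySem

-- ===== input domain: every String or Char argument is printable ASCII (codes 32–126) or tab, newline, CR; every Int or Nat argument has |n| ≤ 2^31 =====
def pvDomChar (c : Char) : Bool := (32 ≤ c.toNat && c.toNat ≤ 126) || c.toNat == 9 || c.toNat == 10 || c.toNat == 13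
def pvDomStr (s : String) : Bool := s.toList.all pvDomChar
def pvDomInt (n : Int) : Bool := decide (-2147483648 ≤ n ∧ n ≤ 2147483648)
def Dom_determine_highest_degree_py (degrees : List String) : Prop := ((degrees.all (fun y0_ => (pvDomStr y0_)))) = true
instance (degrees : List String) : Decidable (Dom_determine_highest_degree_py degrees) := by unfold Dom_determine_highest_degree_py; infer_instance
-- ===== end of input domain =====

-- B replaces A's running-maximum scan by one set build plus a walk over the fixed rank
-- names in descending order (idiomatic; same cost).

-- ===== PORT A =====
-- the literal dict 'degree_rank'
def degreeRank : PySem.Dict String Int :=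
  PySem.Dict.mk [("doctorate", 5), ("master", 4), ("bachelor", 3),
                 ("associate", 2), ("high school", 1)]

-- the for-loop: state (highest_rank, highest_degree), updated exactly as A does
def determine_highest_degree_py (degrees : List String) : Option String :=
  (degrees.foldl
    (fun st degree =>
      let rank := degreeRank.getD degree 0
      if rank > st.1 then (rank, some degree) else st)
    ((0 : Int), (none : Option String))).2

-- ===== PORT B =====
def rankNames : List String := ["doctorate", "master", "bachelor", "associate", "high school"]

def determine_highest_degree_py_alt (degrees : List String) : Option String :=
  let degreeSet := PySem.Set.ofList degrees
  rankNames.find? (fun name => PySem.Set.contains degreeSet name)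

-- ===== PRECONDITION & SPEC =====
def Spec_determine_highest_degree_py (degrees : List String) (out : Option String) : Prop := out = determine_highest_degree_py_alt degrees
instance (degrees : List String) (out : Option String) : Decidable (Spec_determine_highest_degree_py degrees out) := by unfold Spec_determine_highest_degree_py; infer_instance

-- ===== CLAIM (what is proved, stated in full; the proofs are below) =====
def Claim_equal_determine_highest_degree_py : Prop := ∀ (degrees : List String), Dom_determine_highest_degree_py degrees → Spec_determine_highest_degree_py degrees (determine_highest_degree_py degrees)

-- ===== LEMMAS AND PROOFS =====

-- rank of one degree string, and the maximum rank over a list (what A's loop tracks)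
def rk (d : String) : Int := degreeRank.getD d 0

def maxRk (xs : List String) : Int := xs.foldl (fun m d => max m (rk d)) 0

-- the canonical name of a rank (A's highest_degree once the rank is known)
def invName (r : Int) : Option String :=
  if r = 5 then some "doctorate" else if r = 4 then some "master"
  else if r = 3 then some "bachelor" else if r = 2 then some "associate"
  else if r = 1 then some "high school" else none

lemma rk_eq (d : String) :
    rk d = if "doctorate" = d then 5 else if "master" = d then 4
      else if "bachelor" = d then 3 else if "associate" = d then 2
      else if "high school" = d then 1 else 0 := by
  simp only [rk, degreeRank, PySem.Dict.getD, PySem.Dict.get?_mk_cons, beq_iff_eq]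
  split_ifs <;> simp [PySem.Dict.get?]

lemma rk_nonneg (d : String) : 0 ≤ rk d := by
  rw [rk_eq]; split_ifs <;> norm_num

lemma foldl_max_shift (xs : List String) (a : Int) (ha : 0 ≤ a) :
    xs.foldl (fun m d => max m (rk d)) a = max a (maxRk xs) := by
  induction xs generalizing a with
  | nil => simpa [maxRk] using (max_eq_left ha).symm
  | cons d xs ih =>
    have h1 := rk_nonneg d
    simp only [List.foldl_cons, maxRk]
    rw [ih _ (by omega), ih (max 0 (rk d)) (by omega)]
    omega

lemma maxRk_nonneg (xs : List String) : 0 ≤ maxRk xs := by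
  have h := foldl_max_shift xs 0 le_rfl
  simp only [maxRk] at h ⊢
  omega

lemma maxRk_cons (d : String) (xs : List String) :
    maxRk (d :: xs) = max (rk d) (maxRk xs) := by
  have h1 := rk_nonneg d
  have h2 := maxRk_nonneg xs
  show List.foldl _ (max 0 (rk d)) xs = _
  rw [foldl_max_shift xs _ (by omega)]
  omega

-- a positive rank pins down the string: it is the canonical name of that rank
lemma some_eq_invName (d : String) (h0 : 0 < rk d) : some d = invName (rk d) := by
  rw [rk_eq] at h0 ⊢
  split_ifs at h0 ⊢ <;> simp_all [invName]

-- A's loop state is determined by the maximum rank seen so far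
lemma foldA_state (xs : List String) (r : Int) (hr : 0 ≤ r) :
    xs.foldl
      (fun st degree =>
        let rank := degreeRank.getD degree 0
        if rank > st.1 then (rank, some degree) else st)
      (r, invName r)
    = (max r (maxRk xs), invName (max r (maxRk xs))) := by
  induction xs generalizing r with
  | nil => simp [maxRk, max_eq_left hr]
  | cons d xs ih =>
    rw [maxRk_cons]
    simp only [List.foldl_cons]
    show List.foldl _ (if rk d > r then (rk d, some d) else (r, invName r)) xs = _
    by_cases h : rk d > r
    · have hd : some d = invName (rk d) := some_eq_invName d (lt_of_le_of_lt hr h)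
      rw [if_pos h, hd, ih _ (by omega)]
      have e : max (rk d) (maxRk xs) = max r (max (rk d) (maxRk xs)) := by omega
      rw [← e]
    · rw [if_neg h, ih _ hr]
      have e : max r (maxRk xs) = max r (max (rk d) (maxRk xs)) := by
        have := maxRk_nonneg xs; omega
      rw [← e]

lemma A_eq_invName (xs : List String) :
    determine_highest_degree_py xs = invName (maxRk xs) := by
  have h0 : (none : Option String) = invName 0 := by decide
  have hm : max 0 (maxRk xs) = maxRk xs := by
    have := maxRk_nonneg xs; omega
  simp only [determine_highest_degree_py]
  rw [h0, foldA_state xs 0 le_rfl, hm]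

lemma maxRk_eq_if (xs : List String) :
    maxRk xs =
      if "doctorate" ∈ xs then 5 else if "master" ∈ xs then 4
      else if "bachelor" ∈ xs then 3 else if "associate" ∈ xs then 2
      else if "high school" ∈ xs then 1 else 0 := by
  induction xs with
  | nil => simp [maxRk]
  | cons d xs ih =>
    rw [maxRk_cons, ih, rk_eq]
    clear ih
    simp only [List.mem_cons]
    by_cases h1 : "doctorate" = d <;> by_cases h2 : "master" = d <;>
      by_cases h3 : "bachelor" = d <;> by_cases h4 : "associate" = d <;>
      by_cases h5 : "high school" = d <;>
      simp [h1, h2, h3, h4, h5] <;> split_ifs <;> first | rfl | omega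

lemma B_eq_if (xs : List String) :
    determine_highest_degree_py_alt xs =
      if "doctorate" ∈ xs then some "doctorate" else if "master" ∈ xs then some "master"
      else if "bachelor" ∈ xs then some "bachelor" else if "associate" ∈ xs then some "associate"
      else if "high school" ∈ xs then some "high school" else none := by
  simp only [determine_highest_degree_py_alt, rankNames, List.find?_cons,
    PySem.Set.contains_eq_listContains]
  by_cases h1 : "doctorate" ∈ xs <;> by_cases h2 : "master" ∈ xs <;>
    by_cases h3 : "bachelor" ∈ xs <;> by_cases h4 : "associate" ∈ xs <;>
    by_cases h5 : "high school" ∈ xs <;>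
    simp [h1, h2, h3, h4, h5, PySem.Set.mem_ofList]

-- ===== VERDICT (by name: the statement is the Claim_ definition above) =====
theorem determine_highest_degree_py_spec : Claim_equal_determine_highest_degree_py := by
  intro degrees _
  unfold Spec_determine_highest_degree_py
  rw [A_eq_invName, maxRk_eq_if, B_eq_if]
  split_ifs <;> rfl
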